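-- pv_equiv track=rewrite | github.com/b1ueskydragon/PythonGround | dailyOne/p489/solve.py | length_of_longest_subarray
-- ===== SOURCE A (Python) =====
-- def length_of_longest_subarray(xs):
--     if not xs:
--         return 0
--
--     def is_all_unique(i, j, ary):
--         a = ary[i:j + 1]  # additional space
--         return len(a) == len(set(a))
--
--     prev, curr = 1, 1
--     l, r = 0, 1  # r is faster
--     while r < len(xs):
--         if is_all_unique(l, r, xs):
--             curr = r - l + 1
--         else:
--             prev = max(curr, prev)
--             curr = 1
--             l += 1
--         r += 1
--     return max(curr, prev)
-- ===== SOURCE B (Python) =====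
-- def length_of_longest_subarray(xs):
--     # O(n): track, via a last-seen-index dict, the running maximum m of
--     # previous-occurrence indices; window [l..r] is duplicate-free iff m < l.
--     if not xs:
--         return 0
--     last = {xs[0]: 0}
--     m = -1
--     prev = curr = 1
--     l = 0
--     for r in range(1, len(xs)):
--         x = xs[r]
--         m = max(m, last.get(x, -1))
--         if m < l:
--             curr = r - l + 1
--         else:
--             prev = max(curr, prev)
--             curr = 1
--             l += 1
--         last[x] = r
--     return max(curr, prev)
-- ===== Notes on version B (the rewrite author's own statement) =====
-- stated objective: faster
-- what changed: A rescans and copies the window xs[l:r+1] and builds a set on every step to test uniqueness; B keeps a last-seen-index dict and the running maximum m of previous-occurrence indices, so the uniqueness test becomes the O(1) comparison m < l and the whole function is one O(n) pass.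
import Mathlib
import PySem

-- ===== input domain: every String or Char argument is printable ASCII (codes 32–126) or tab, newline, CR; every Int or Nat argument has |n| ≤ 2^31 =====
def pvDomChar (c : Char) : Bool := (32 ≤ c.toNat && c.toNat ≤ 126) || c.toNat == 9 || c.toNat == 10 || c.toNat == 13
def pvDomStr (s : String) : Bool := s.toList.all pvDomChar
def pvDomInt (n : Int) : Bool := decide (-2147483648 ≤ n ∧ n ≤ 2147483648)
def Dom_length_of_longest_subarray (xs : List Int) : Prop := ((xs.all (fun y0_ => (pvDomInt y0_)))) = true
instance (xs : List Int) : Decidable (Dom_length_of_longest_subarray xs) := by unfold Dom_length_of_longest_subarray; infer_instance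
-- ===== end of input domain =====

-- B replaces A's per-step window rescan (slice + set) by a last-seen-index dict and a
-- running maximum of previous-occurrence indices, turning the loop into one O(n) pass.


-- ===== PORT A =====
-- helper is_all_unique(i, j, ary): a = ary[i:j+1]; len(a) == len(set(a))
def pvIsAllUnique (i j : Int) (ary : List Int) : Bool :=
  let a := PySem.List.slice ary (some i) (some (j + 1))
  a.length == (PySem.Set.ofList a).length

-- one iteration of A's while-loop body; state = (prev, curr, l), r the loop counter
def pvStepA (xs : List Int) (s : Int × Int × Int) (r : Int) : Int × Int × Int :=
  if pvIsAllUnique s.2.2 r xs then (s.1, r - s.2.2 + 1, s.2.2)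
  else (max s.2.1 s.1, 1, s.2.2 + 1)

def length_of_longest_subarray (xs : List Int) : Int :=
  if xs = [] then 0
  else
    let s := (PySem.List.pyRange 1 (xs.length : Int)).foldl (pvStepA xs) (1, 1, 0)
    max s.2.1 s.1

-- ===== PORT B =====
-- one iteration of B's for-loop body; state = (last, m, prev, curr, l)
def pvStepB (xs : List Int) (s : PySem.Dict Int Int × Int × Int × Int × Int) (r : Int) :
    PySem.Dict Int Int × Int × Int × Int × Int :=
  match s with
  | (last, m, prev, curr, l) =>
    let x := PySem.List.pyGetD xs r 0   -- xs[r]; r is always in range in this loop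
    let m' := max m (last.getD x (-1))
    if m' < l then (last.insert x r, m', prev, r - l + 1, l)
    else (last.insert x r, m', max curr prev, 1, l + 1)

def length_of_longest_subarray_alt (xs : List Int) : Int :=
  if xs = [] then 0
  else
    let x0 := PySem.List.pyGetD xs 0 0  -- xs[0]; xs is nonempty here
    let s := (PySem.List.pyRange 1 (xs.length : Int)).foldl (pvStepB xs)
      (PySem.Dict.empty.insert x0 0, -1, 1, 1, 0)
    max s.2.2.2.1 s.2.2.1

-- ===== PRECONDITION & SPEC =====
def Spec_length_of_longest_subarray (xs : List Int) (out : Int) : Prop := out = length_of_longest_subarray_alt xs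
instance (xs : List Int) (out : Int) : Decidable (Spec_length_of_longest_subarray xs out) := by unfold Spec_length_of_longest_subarray; infer_instance

-- ===== CLAIM (what is proved, stated in full; the proofs are below) =====
def Claim_equal_length_of_longest_subarray : Prop := ∀ (xs : List Int), Dom_length_of_longest_subarray xs → Spec_length_of_longest_subarray xs (length_of_longest_subarray xs)

-- ===== LEMMAS AND PROOFS =====

-- index of the last occurrence of v among xs[0..r-1], or -1
def pvLastIdx (xs : List Int) : Nat → Int → Int
  | 0, _ => -1
  | (r+1), v => if xs[r]? = some v then (r : Int) else pvLastIdx xs r v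

-- max over j < r of the previous-occurrence index of xs[j], or -1
def pvMaxPrev (xs : List Int) : Nat → Int
  | 0 => -1
  | (r+1) => max (pvMaxPrev xs r) (pvLastIdx xs r (xs.getD r 0))

theorem pvLastIdx_lt_iff (xs : List Int) (v : Int) (c : Int) (hc : 0 ≤ c) (j : Nat) :
    pvLastIdx xs j v < c ↔ ∀ i : Nat, c ≤ (i : Int) → i < j → xs[i]? ≠ some v := by
  induction j with
  | zero => simp [pvLastIdx]; omega
  | succ j ih =>
    simp only [pvLastIdx]
    split
    · rename_i h
      constructor
      · intro hlt i hci hij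
        exfalso
        have : (i : Int) ≤ (j : Int) := by exact_mod_cast Nat.lt_succ_iff.mp hij
        omega
      · intro hall
        by_contra hnot
        exact hall j (not_lt.mp hnot) (Nat.lt_succ_self j) h
    · rename_i h
      rw [ih]
      constructor
      · intro hall i hci hij
        rcases Nat.lt_succ_iff_lt_or_eq.mp hij with h' | h'
        · exact hall i hci h'
        · subst h'; exact h
      · intro hall i hci hij
        exact hall i hci (Nat.lt_succ_of_lt hij)

theorem pvMaxPrev_lt_iff (xs : List Int) (c : Int) (r : Nat) :
    pvMaxPrev xs r < c ↔ (-1 < c ∧ ∀ j : Nat, j < r → pvLastIdx xs j (xs.getD j 0) < c) := by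
  induction r with
  | zero => simp [pvMaxPrev]
  | succ r ih =>
    simp only [pvMaxPrev, max_lt_iff, ih]
    constructor
    · rintro ⟨⟨h1, h2⟩, h3⟩
      refine ⟨h1, fun j hj => ?_⟩
      rcases Nat.lt_succ_iff_lt_or_eq.mp hj with h' | h'
      · exact h2 j h'
      · subst h'; exact h3
    · rintro ⟨h1, h2⟩
      exact ⟨⟨h1, fun j hj => h2 j (Nat.lt_succ_of_lt hj)⟩, h2 r (Nat.lt_succ_self r)⟩

theorem pv_ofList_sublist (a : List Int) : (PySem.Set.ofList a).Sublist a := by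
  induction a with
  | nil => simp [PySem.Set.ofList]
  | cons x xs ih =>
    rw [PySem.Set.ofList_cons]
    exact List.Sublist.cons₂ x (List.Sublist.trans (by simp [PySem.Set.discard]) ih)

theorem pv_len_ofList_iff (a : List Int) :
    (a.length = (PySem.Set.ofList a).length) ↔ a.Nodup := by
  constructor
  · intro h
    have he : PySem.Set.ofList a = a := (pv_ofList_sublist a).eq_of_length h.symm
    have := PySem.Set.nodup_ofList a
    rwa [he] at this
  · intro h
    rw [PySem.Set.ofList_eq_self_of_nodup a h]

-- A's uniqueness test on the window [l..r] is exactly B's comparison pvMaxPrev < l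
theorem pv_key (xs : List Int) (l r : Nat) (hlr : l ≤ r) (hrn : r < xs.length) :
    (pvIsAllUnique (l : Int) (r : Int) xs = true) ↔ pvMaxPrev xs (r + 1) < (l : Int) := by
  have hcast : ((r : Int) + 1) = ((r + 1 : Nat) : Int) := by push_cast; ring
  have hslice : PySem.List.slice xs (some (l : Int)) (some ((r : Int) + 1)) =
      (xs.drop l).take (r + 1 - l) := by
    rw [hcast, PySem.List.slice_natCast]
  have hw : ∀ k : Nat, ((xs.drop l).take (r + 1 - l))[k]? =
      if k < r + 1 - l then xs[l + k]? else none := by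
    intro k
    rw [List.getElem?_take]
    split
    · rw [List.getElem?_drop]
    · rfl
  constructor
  · intro h
    -- from uniqueness of the window to the max bound
    have hnd : ((xs.drop l).take (r + 1 - l)).Nodup := by
      rw [← pv_len_ofList_iff]
      simpa [pvIsAllUnique, hslice] using h
    rw [pvMaxPrev_lt_iff]
    refine ⟨by omega, fun j hj => ?_⟩
    rw [pvLastIdx_lt_iff xs _ _ (by omega) j]
    intro i hci hij hbad
    have hil : l ≤ i := by exact_mod_cast hci
    have hjn : j < xs.length := by omega
    have hin : i < xs.length := by omega
    have hx : xs[i]? = some xs[j] := by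
      rw [List.getD_eq_getElem xs 0 hjn] at hbad
      exact hbad
    have h1 : ((xs.drop l).take (r + 1 - l))[i - l]? = ((xs.drop l).take (r + 1 - l))[j - l]? := by
      rw [hw, hw]
      have e1 : l + (i - l) = i := by omega
      have e2 : l + (j - l) = j := by omega
      rw [if_pos (by omega), if_pos (by omega), e1, e2, hx, List.getElem?_eq_getElem hjn]
    have := List.nodup_iff_getElem?_ne_getElem?.mp hnd (i - l) (j - l) (by omega)
      (by simp [List.length_take, List.length_drop]; omega)
    exact this h1
  · intro h
    -- from the max bound to uniqueness of the window
    rw [pvMaxPrev_lt_iff] at h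
    obtain ⟨-, hall⟩ := h
    have hnd : ((xs.drop l).take (r + 1 - l)).Nodup := by
      rw [List.nodup_iff_getElem?_ne_getElem?]
      intro a b hab hblen heq
      have hblen' : b < r + 1 - l := by
        simp [List.length_take, List.length_drop] at hblen
        omega
      have hj := hall (l + b) (by omega)
      rw [pvLastIdx_lt_iff xs _ _ (by omega) (l + b)] at hj
      have hbn : l + b < xs.length := by omega
      refine hj (l + a) (by exact_mod_cast Nat.le_add_right l a) (by omega) ?_
      rw [hw, hw, if_pos (by omega), if_pos hblen'] at heq
      rw [List.getD_eq_getElem xs 0 hbn, ← List.getElem?_eq_getElem hbn]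
      exact heq
    simp only [pvIsAllUnique, hslice, beq_iff_eq]
    exact (pv_len_ofList_iff _).mpr hnd

-- simulation: from any position r with matching states, both folds agree on (prev, curr, l)
theorem pv_sim (xs : List Int) :
    ∀ (k r : Nat), xs.length ≤ r + k → 1 ≤ r →
    ∀ (last : PySem.Dict Int Int) (m prev curr : Int) (l : Nat),
    (∀ v, last.getD v (-1) = pvLastIdx xs r v) → m = pvMaxPrev xs r → l < r →
    (let sB := (PySem.List.pyRange (r : Int) (xs.length : Int)).foldl (pvStepB xs)
        (last, m, prev, curr, (l : Int));
     let sA := (PySem.List.pyRange (r : Int) (xs.length : Int)).foldl (pvStepA xs)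
        (prev, curr, (l : Int));
     sA.1 = sB.2.2.1 ∧ sA.2.1 = sB.2.2.2.1 ∧ sA.2.2 = sB.2.2.2.2) := by
  intro k
  induction k with
  | zero =>
    intro r hk hr last m prev curr l hlast hm hl
    rw [PySem.List.pyRange_one_eq_nil (by exact_mod_cast hk)]
    exact ⟨rfl, rfl, rfl⟩
  | succ k ih =>
    intro r hk hr last m prev curr l hlast hm hl
    by_cases hrn : r < xs.length
    · rw [PySem.List.pyRange_one_cons (by exact_mod_cast hrn)]
      simp only [List.foldl_cons]
      have hx : PySem.List.pyGetD xs (r : Int) 0 = xs.getD r 0 :=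
        PySem.List.pyGetD_natCast xs r 0
      have hget : xs[r]? = some (xs.getD r 0) := by
        rw [List.getD_eq_getElem xs 0 hrn, List.getElem?_eq_getElem hrn]
      have hm' : max m (last.getD (PySem.List.pyGetD xs (r : Int) 0) (-1)) =
          pvMaxPrev xs (r + 1) := by
        rw [hx, hlast, hm, pvMaxPrev]
      have hlast' : ∀ v, ((last.insert (PySem.List.pyGetD xs (r : Int) 0) (r : Int)).getD v (-1)) =
          pvLastIdx xs (r + 1) v := by
        intro v
        rw [hx, PySem.Dict.getD_insert, pvLastIdx, hget]
        by_cases hv : v = xs.getD r 0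
        · rw [if_pos hv, if_pos (by rw [hv])]
        · rw [if_neg hv, if_neg (by simpa [eq_comm] using hv), hlast]
      have hcond : (pvIsAllUnique (l : Int) (r : Int) xs = true) ↔
          pvMaxPrev xs (r + 1) < (l : Int) := pv_key xs l r (by omega) hrn
      by_cases hc : pvMaxPrev xs (r + 1) < (l : Int)
      · -- unique window: both take the first branch
        have hstepB : pvStepB xs (last, m, prev, curr, (l : Int)) (r : Int) =
            (last.insert (PySem.List.pyGetD xs (r : Int) 0) (r : Int),
              pvMaxPrev xs (r + 1), prev, (r : Int) - (l : Int) + 1, (l : Int)) := by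
          simp only [pvStepB, hm']
          rw [if_pos hc]
        have hstepA : pvStepA xs (prev, curr, (l : Int)) (r : Int) =
            (prev, (r : Int) - (l : Int) + 1, (l : Int)) := by
          simp only [pvStepA]
          rw [if_pos (hcond.mpr hc)]
        rw [hstepB, hstepA]
        have := ih (r + 1) (by omega) (by omega)
          (last.insert (PySem.List.pyGetD xs (r : Int) 0) (r : Int))
          (pvMaxPrev xs (r + 1)) prev ((r : Int) - (l : Int) + 1) l hlast' rfl (by omega)
        simpa using this
      · -- duplicate in window: both take the second branch, l advances
        have hstepB : pvStepB xs (last, m, prev, curr, (l : Int)) (r : Int) =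
            (last.insert (PySem.List.pyGetD xs (r : Int) 0) (r : Int),
              pvMaxPrev xs (r + 1), max curr prev, 1, ((l + 1 : Nat) : Int)) := by
          simp only [pvStepB, hm']
          rw [if_neg hc]
          push_cast
          rfl
        have hstepA : pvStepA xs (prev, curr, (l : Int)) (r : Int) =
            (max curr prev, 1, ((l + 1 : Nat) : Int)) := by
          simp only [pvStepA]
          rw [if_neg (fun hu => hc (hcond.mp hu))]
          push_cast
          rfl
        rw [hstepB, hstepA]
        have := ih (r + 1) (by omega) (by omega)
          (last.insert (PySem.List.pyGetD xs (r : Int) 0) (r : Int))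
          (pvMaxPrev xs (r + 1)) (max curr prev) 1 (l + 1) hlast' rfl (by omega)
        simpa using this
    · rw [PySem.List.pyRange_one_eq_nil (by exact_mod_cast (by omega : xs.length ≤ r))]
      exact ⟨rfl, rfl, rfl⟩

-- ===== VERDICT (by name: the statement is the Claim_ definition above) =====
theorem length_of_longest_subarray_spec : Claim_equal_length_of_longest_subarray := by
  intro xs _
  unfold Spec_length_of_longest_subarray
  unfold length_of_longest_subarray length_of_longest_subarray_alt
  by_cases hnil : xs = []
  · rw [if_pos hnil, if_pos hnil]
  · rw [if_neg hnil, if_neg hnil]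
    have hlen : 1 ≤ xs.length := List.length_pos_of_ne_nil hnil
    have h0 : (0 : Nat) < xs.length := by omega
    have hget0 : xs[0]? = some (xs.getD 0 0) := by
      rw [List.getD_eq_getElem xs 0 h0, List.getElem?_eq_getElem h0]
    have hlast0 : ∀ v, ((PySem.Dict.empty.insert (PySem.List.pyGetD xs 0 0) 0).getD v (-1)) =
        pvLastIdx xs 1 v := by
      intro v
      have hx0 : PySem.List.pyGetD xs (0 : Int) 0 = xs.getD 0 0 := by
        simpa using PySem.List.pyGetD_natCast xs 0 0
      rw [hx0, PySem.Dict.getD_insert]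
      show _ = pvLastIdx xs (0 + 1) v
      rw [pvLastIdx, hget0]
      by_cases hv : v = xs.getD 0 0
      · rw [if_pos hv, if_pos (by rw [hv])]
        simp
      · rw [if_neg hv, if_neg (by simpa [eq_comm] using hv), PySem.Dict.getD_empty]
        rfl
    have hsim := pv_sim xs (xs.length - 1) 1 (by omega) (le_refl 1)
      (PySem.Dict.empty.insert (PySem.List.pyGetD xs 0 0) 0) (-1) 1 1 0
      hlast0 (by rw [pvMaxPrev]; rfl) (by omega)
    simp only [Nat.cast_zero, Nat.cast_one] at hsim
    obtain ⟨h1, h2, -⟩ := hsim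
    simp only []
    rw [h1, h2]
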